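-- pv_equiv track=rewrite | github.com/ardrodus/dark-fac | crucible/scenario_gen.py | _classify_changes
-- ===== SOURCE A (Python) =====
-- def _classify_changes(files: list[str]) -> dict[str, list[str]]:
--     """Classify changed files by type."""
--     categories: dict[str, list[str]] = {
--         "routes": [], "components": [], "api": [],
--         "models": [], "config": [], "tests": [], "other": [],
--     }
--     for f in files:
--         fl = f.lower()
--         if any(p in fl for p in ("route", "controller", "handler", "endpoint")):
--             categories["routes"].append(f)
--         elif any(p in fl for p in ("component", "page", "view", "template")):
--             categories["components"].append(f)
--         elif any(p in fl for p in ("api/", "service", "client")):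
--             categories["api"].append(f)
--         elif any(p in fl for p in ("model", "schema", "entity", "migration")):
--             categories["models"].append(f)
--         elif any(p in fl for p in ("config", ".env", "setting")):
--             categories["config"].append(f)
--         elif any(p in fl for p in ("test", "spec", "__test__")):
--             categories["tests"].append(f)
--         else:
--             categories["other"].append(f)
--     return {k: v for k, v in categories.items() if v}
-- ===== SOURCE B (Python) =====
-- RULES = [
--     ("routes", ("route", "controller", "handler", "endpoint")),
--     ("components", ("component", "page", "view", "template")),
--     ("api", ("api/", "service", "client")),
--     ("models", ("model", "schema", "entity", "migration")),
--     ("config", ("config", ".env", "setting")),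
--     ("tests", ("test", "spec", "__test__")),
-- ]
--
-- def _category(f: str) -> str:
--     fl = f.lower()
--     return next((cat for cat, pats in RULES if any(p in fl for p in pats)), "other")
--
-- def _classify_changes(files: list[str]) -> dict[str, list[str]]:
--     cats = [_category(f) for f in files]
--     result: dict[str, list[str]] = {}
--     for cat in [k for k, _ in RULES] + ["other"]:
--         bucket = [f for f, c in zip(files, cats) if c == cat]
--         if bucket:
--             result[cat] = bucket
--     return result
-- ===== Notes on version B (the rewrite author's own statement) =====
-- stated objective: idiomatic
-- what changed: B replaces A's single pass appending into seven pre-initialized buckets by a declarative ordered rules table with a first-match category function, computed once per file, and one filter pass per category, building only the nonempty buckets.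
import Mathlib
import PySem

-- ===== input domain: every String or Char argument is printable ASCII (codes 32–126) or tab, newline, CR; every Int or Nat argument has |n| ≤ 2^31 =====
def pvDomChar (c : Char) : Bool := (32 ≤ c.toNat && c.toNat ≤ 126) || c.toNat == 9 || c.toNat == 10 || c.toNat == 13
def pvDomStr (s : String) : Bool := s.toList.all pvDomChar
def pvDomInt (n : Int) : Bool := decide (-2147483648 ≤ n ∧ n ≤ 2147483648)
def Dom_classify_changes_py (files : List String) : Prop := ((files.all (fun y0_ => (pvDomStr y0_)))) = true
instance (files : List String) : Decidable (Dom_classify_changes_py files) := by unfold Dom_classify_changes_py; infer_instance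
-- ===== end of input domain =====

-- B replaces A's single pass that appends into seven pre-made buckets by a rules table with a
-- first-match category function and one filter pass per category (objective: idiomatic/alternative).

-- ===== PORT A =====
-- categories["k"].append(f) is ported as modify "k" [] (· ++ [f]); the key is always present, so
-- the default is never used. The final dict comprehension keeps the items with nonempty value; the
-- source dict's keys are distinct, so the comprehension's items are exactly the filtered items list.
def classify_changes_py (files : List String) : List (String × List String) :=
  let categories : PySem.Dict String (List String) := PySem.Dict.mk
    [("routes", []), ("components", []), ("api", []), ("models", []), ("config", []), ("tests", []), ("other", [])]
  let categories := files.foldl (fun d f =>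
    let fl := PySem.Str.lower f
    if ["route", "controller", "handler", "endpoint"].any (fun p => PySem.Str.isIn p fl) then
      d.modify "routes" [] (· ++ [f])
    else if ["component", "page", "view", "template"].any (fun p => PySem.Str.isIn p fl) then
      d.modify "components" [] (· ++ [f])
    else if ["api/", "service", "client"].any (fun p => PySem.Str.isIn p fl) then
      d.modify "api" [] (· ++ [f])
    else if ["model", "schema", "entity", "migration"].any (fun p => PySem.Str.isIn p fl) then
      d.modify "models" [] (· ++ [f])
    else if ["config", ".env", "setting"].any (fun p => PySem.Str.isIn p fl) then
      d.modify "config" [] (· ++ [f])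
    else if ["test", "spec", "__test__"].any (fun p => PySem.Str.isIn p fl) then
      d.modify "tests" [] (· ++ [f])
    else
      d.modify "other" [] (· ++ [f])) categories
  categories.items.filter (fun p => !p.2.isEmpty)

-- ===== PORT B =====
def pvRules : List (String × List String) := [
  ("routes", ["route", "controller", "handler", "endpoint"]),
  ("components", ["component", "page", "view", "template"]),
  ("api", ["api/", "service", "client"]),
  ("models", ["model", "schema", "entity", "migration"]),
  ("config", ["config", ".env", "setting"]),
  ("tests", ["test", "spec", "__test__"])]

def pvCategory (f : String) : String :=
  let fl := PySem.Str.lower f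
  ((pvRules.find? (fun r => r.2.any (fun p => PySem.Str.isIn p fl))).map (·.1)).getD "other"

def classify_changes_py_alt (files : List String) : List (String × List String) :=
  let cats := files.map pvCategory
  (pvRules.map (·.1) ++ ["other"]).foldl (fun result cat =>
    let bucket := ((files.zip cats).filter (fun p => p.2 == cat)).map (·.1)
    if bucket.isEmpty then result else result ++ [(cat, bucket)]) []

-- ===== PRECONDITION & SPEC =====
def Spec_classify_changes_py (files : List String) (out : List (String × List String)) : Prop := out = classify_changes_py_alt files
instance (files : List String) (out : List (String × List String)) : Decidable (Spec_classify_changes_py files out) := by unfold Spec_classify_changes_py; infer_instance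

-- ===== CLAIM (what is proved, stated in full; the proofs are below) =====
def Claim_equal_classify_changes_py : Prop := ∀ (files : List String), Dom_classify_changes_py files → Spec_classify_changes_py files (classify_changes_py files)

-- ===== LEMMAS AND PROOFS =====

lemma stepA_fun :
    (fun (d : PySem.Dict String (List String)) (f : String) =>
    let fl := PySem.Str.lower f
    if ["route", "controller", "handler", "endpoint"].any (fun p => PySem.Str.isIn p fl) then
      d.modify "routes" [] (· ++ [f])
    else if ["component", "page", "view", "template"].any (fun p => PySem.Str.isIn p fl) then
      d.modify "components" [] (· ++ [f])
    else if ["api/", "service", "client"].any (fun p => PySem.Str.isIn p fl) then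
      d.modify "api" [] (· ++ [f])
    else if ["model", "schema", "entity", "migration"].any (fun p => PySem.Str.isIn p fl) then
      d.modify "models" [] (· ++ [f])
    else if ["config", ".env", "setting"].any (fun p => PySem.Str.isIn p fl) then
      d.modify "config" [] (· ++ [f])
    else if ["test", "spec", "__test__"].any (fun p => PySem.Str.isIn p fl) then
      d.modify "tests" [] (· ++ [f])
    else
      d.modify "other" [] (· ++ [f]))
    = (fun d f => d.modify (pvCategory f) [] (· ++ [f])) := by
  funext d f
  show _ = d.modify (pvCategory f) [] (· ++ [f])
  unfold pvCategory pvRules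
  simp only [List.find?, List.any_cons, List.any_nil, Bool.or_false]
  split_ifs <;>
    simp only [Bool.not_eq_true] at * <;>
    simp only [*, Option.map_some, Option.map_none, Option.getD_some, Option.getD_none]

lemma foldA_eq (files : List String) (d : PySem.Dict String (List String)) :
    files.foldl (fun d f =>
    let fl := PySem.Str.lower f
    if ["route", "controller", "handler", "endpoint"].any (fun p => PySem.Str.isIn p fl) then
      d.modify "routes" [] (· ++ [f])
    else if ["component", "page", "view", "template"].any (fun p => PySem.Str.isIn p fl) then
      d.modify "components" [] (· ++ [f])
    else if ["api/", "service", "client"].any (fun p => PySem.Str.isIn p fl) then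
      d.modify "api" [] (· ++ [f])
    else if ["model", "schema", "entity", "migration"].any (fun p => PySem.Str.isIn p fl) then
      d.modify "models" [] (· ++ [f])
    else if ["config", ".env", "setting"].any (fun p => PySem.Str.isIn p fl) then
      d.modify "config" [] (· ++ [f])
    else if ["test", "spec", "__test__"].any (fun p => PySem.Str.isIn p fl) then
      d.modify "tests" [] (· ++ [f])
    else
      d.modify "other" [] (· ++ [f])) d
    = files.foldl (fun d f => d.modify (pvCategory f) [] (· ++ [f])) d := by
  rw [stepA_fun]

lemma pvCategory_mem (f : String) :
    pvCategory f ∈ pvRules.map (·.1) ++ ["other"] := by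
  unfold pvCategory
  show ((pvRules.find? (fun r => r.2.any (fun p => PySem.Str.isIn p (PySem.Str.lower f)))).map (·.1)).getD "other"
      ∈ pvRules.map (·.1) ++ ["other"]
  rcases h : pvRules.find? (fun r => r.2.any (fun p => PySem.Str.isIn p (PySem.Str.lower f))) with _ | r
  · rw [h]; simp
  · rw [h]
    have hr := List.mem_of_find?_eq_some h
    simp only [Option.map_some, Option.getD_some]
    exact List.mem_append_left _ (List.mem_map_of_mem hr)

def pvInit : PySem.Dict String (List String) := PySem.Dict.mk
  [("routes", []), ("components", []), ("api", []), ("models", []),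
   ("config", []), ("tests", []), ("other", [])]

lemma pvInit_getD (c : String) : pvInit.getD c [] = [] := by
  simp only [pvInit, PySem.Dict.getD_eq_get?_getD, PySem.Dict.get?_mk_cons]
  split_ifs <;> simp [PySem.Dict.get?]

lemma foldA_items (files : List String) :
    (files.foldl (fun d f => d.modify (pvCategory f) [] (· ++ [f])) pvInit).items
    = (pvRules.map (·.1) ++ ["other"]).map
        (fun k => (k, files.filter (fun f => pvCategory f == k))) := by
  have hkeys7 : pvInit.keys = pvRules.map (·.1) ++ ["other"] := by decide
  have hkeys : (files.foldl (fun d f => d.modify (pvCategory f) [] (· ++ [f])) pvInit).keys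
      = pvRules.map (·.1) ++ ["other"] := by
    rw [PySem.Dict.keys_foldl_modify_key files pvCategory [] (fun _ x v => v ++ [x]) pvInit,
        PySem.Set.update_eq_append_filter, hkeys7,
        List.filter_eq_nil_iff.mpr, List.append_nil]
    intro y hy
    have hy' : y ∈ files.map pvCategory := by simpa using hy
    obtain ⟨g, -, rfl⟩ := List.mem_map.mp hy' 
    have hc := (PySem.Set.contains_iff _ _).mpr (pvCategory_mem g)
    rw [hc]; simp
  have hnd : (files.foldl (fun d f => d.modify (pvCategory f) [] (· ++ [f])) pvInit).keys.Nodup :=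
    PySem.Dict.nodup_keys_foldl_modify_key files pvCategory [] (fun _ x v => v ++ [x]) pvInit
      (by decide)
  have hpair : files.foldl (fun d f => d.modify (pvCategory f) [] (· ++ [f])) pvInit
      = (files.map (fun f => (pvCategory f, f))).foldl
          (fun d p => d.modify p.1 [] (· ++ [p.2])) pvInit := by
    rw [List.foldl_map]
  have hgetD : ∀ c, (files.foldl (fun d f => d.modify (pvCategory f) [] (· ++ [f])) pvInit).getD c []
      = files.filter (fun f => pvCategory f == c) := by
    intro c
    rw [hpair, PySem.Dict.getD_foldl_modify_append, pvInit_getD, List.nil_append,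
        List.filter_map, List.map_map]
    simp [Function.comp_def]
  rw [PySem.Dict.items_eq_map_keys _ hnd [], hkeys]
  exact List.map_congr_left (fun k _ => by rw [hgetD k])

lemma bucketB (files : List String) (cat : String) :
    ((files.zip (files.map pvCategory)).filter (fun p => p.2 == cat)).map (·.1)
    = files.filter (fun f => pvCategory f == cat) := by
  have hz : files.zip (files.map pvCategory) = files.map (fun f => (f, pvCategory f)) := by
    simpa using List.zip_map' (f := fun f => f) (g := pvCategory) (l := files)
  rw [hz, List.filter_map, List.map_map]
  simp [Function.comp_def]

lemma foldB (files : List String) (keys : List String) (acc : List (String × List String)) :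
    keys.foldl (fun result cat =>
      let bucket := ((files.zip (files.map pvCategory)).filter (fun p => p.2 == cat)).map (·.1)
      if bucket.isEmpty then result else result ++ [(cat, bucket)]) acc
    = acc ++ (keys.map (fun k => (k, files.filter (fun f => pvCategory f == k)))).filter
        (fun p => !p.2.isEmpty) := by
  have hfun : (fun (result : List (String × List String)) (cat : String) =>
      let bucket := ((files.zip (files.map pvCategory)).filter (fun p => p.2 == cat)).map (·.1)
      if bucket.isEmpty then result else result ++ [(cat, bucket)])
      = (fun (result : List (String × List String)) (cat : String) =>
      let bucket := files.filter (fun f => pvCategory f == cat)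
      if bucket.isEmpty then result else result ++ [(cat, bucket)]) := by
    funext result cat
    simp only [bucketB]
  rw [hfun]
  induction keys generalizing acc with
  | nil => simp
  | cons k ks ih =>
    simp only [List.foldl_cons, List.map_cons, List.filter_cons]
    by_cases h : (files.filter (fun f => pvCategory f == k)).isEmpty
    · rw [if_pos h, ih]
      simp [h]
    · rw [if_neg h, ih]
      rw [Bool.not_eq_true] at h
      simp [h]

-- ===== VERDICT (by name: the statement is the Claim_ definition above) =====
theorem classify_changes_py_spec : Claim_equal_classify_changes_py := by
  intro files hD
  clear hD
  show classify_changes_py files = classify_changes_py_alt files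
  have hb : classify_changes_py_alt files
      = [] ++ ((pvRules.map (·.1) ++ ["other"]).map
          (fun k => (k, files.filter (fun f => pvCategory f == k)))).filter
            (fun p => !p.2.isEmpty) :=
    foldB files (pvRules.map (·.1) ++ ["other"]) []
  calc classify_changes_py files
      = ((files.foldl (fun d f =>
    let fl := PySem.Str.lower f
    if ["route", "controller", "handler", "endpoint"].any (fun p => PySem.Str.isIn p fl) then
      d.modify "routes" [] (· ++ [f])
    else if ["component", "page", "view", "template"].any (fun p => PySem.Str.isIn p fl) then
      d.modify "components" [] (· ++ [f])
    else if ["api/", "service", "client"].any (fun p => PySem.Str.isIn p fl) then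
      d.modify "api" [] (· ++ [f])
    else if ["model", "schema", "entity", "migration"].any (fun p => PySem.Str.isIn p fl) then
      d.modify "models" [] (· ++ [f])
    else if ["config", ".env", "setting"].any (fun p => PySem.Str.isIn p fl) then
      d.modify "config" [] (· ++ [f])
    else if ["test", "spec", "__test__"].any (fun p => PySem.Str.isIn p fl) then
      d.modify "tests" [] (· ++ [f])
    else
      d.modify "other" [] (· ++ [f])) pvInit).items).filter (fun p => !p.2.isEmpty) := rfl
    _ = ((files.foldl (fun d f => d.modify (pvCategory f) [] (· ++ [f])) pvInit).items).filter
          (fun p => !p.2.isEmpty) := by rw [foldA_eq]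
    _ = ((pvRules.map (·.1) ++ ["other"]).map
          (fun k => (k, files.filter (fun f => pvCategory f == k)))).filter
            (fun p => !p.2.isEmpty) := by rw [foldA_items]
    _ = classify_changes_py_alt files := by rw [hb, List.nil_append]
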